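-- pv_equiv track=rewrite | github.com/AFigaro/Power-indices | utils/index_utils.py | min_win_holl
-- ===== SOURCE A (Python) =====
-- from itertools import combinations
--
-- def combination_all(frac):
--
--     '''Returns all possible subsets (coalitions) for the current parliament composition of parliament'''
--
--     indeces = range(len(frac) + 1)
--     frac = list(zip(indeces, frac))
--     comb = []
--     for i in indeces:
--         comb += combinations(frac, i)
--     return comb
--
-- def all_win(frac, q):
--
--     '''Find all winning coalitions in parliament'''
--
--     indeces = range(len(frac) + 1)
--     all_comb = combination_all(frac)
--     num_of_coal = len(all_comb)
--     win_coal = []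
--     for i in range(num_of_coal):
--         summ = 0
--         for j in range(len(all_comb[i])):
--             summ += all_comb[i][j][1]
--         if summ >= q:
--             win_coal += [all_comb[i]]
--     return win_coal
--
-- def min_win_holl(frac, q):
--
--     '''Minimal winning coalitions for Holler-Packel index'''
--
--     all_win_coal = all_win(frac, q)
--     min_win_coal = []
--     for coalition in all_win_coal:
--         summ_votes = 0
--         for party in coalition:
--             summ_votes += party[1]
--         indicator = 0
--         for party in coalition:
--             if summ_votes - party[1] >= q:
--                 indicator = 1
--         if indicator == 0:
--             min_win_coal += [coalition]
--     return min_win_coal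
-- ===== SOURCE B (Python) =====
-- def min_win_holl(frac, q):
--     '''Minimal winning coalitions for Holler-Packel index'''
--     def buckets(pairs):
--         # buckets(pairs)[r] = all size-r subsets of pairs, lexicographic order (Pascal-triangle DP)
--         if not pairs:
--             return [[()]]
--         p, b = pairs[0], buckets(pairs[1:])
--         shifted = [[(p,) + c for c in bucket] for bucket in b]
--         return [x + y for x, y in zip([[]] + shifted, b + [[]])]
--     out = []
--     for bucket in buckets(list(zip(range(len(frac) + 1), frac))):
--         for c in bucket:
--             s = sum(w for _, w in c)
--             if s >= q and all(s - w < q for _, w in c):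
--                 out.append(c)
--     return out
-- ===== Notes on version B (the rewrite author's own statement) =====
-- stated objective: alternative
-- what changed: B replaces A's per-size itertools.combinations calls plus three staged build-and-rescan lists (all subsets, winning subsets, minimal subsets) by a Pascal-triangle recursion that builds the size-bucketed subset table in one structural pass over the party list, then filters it once with a direct 'sum >= q and every removal loses' test.
import Mathlib
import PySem

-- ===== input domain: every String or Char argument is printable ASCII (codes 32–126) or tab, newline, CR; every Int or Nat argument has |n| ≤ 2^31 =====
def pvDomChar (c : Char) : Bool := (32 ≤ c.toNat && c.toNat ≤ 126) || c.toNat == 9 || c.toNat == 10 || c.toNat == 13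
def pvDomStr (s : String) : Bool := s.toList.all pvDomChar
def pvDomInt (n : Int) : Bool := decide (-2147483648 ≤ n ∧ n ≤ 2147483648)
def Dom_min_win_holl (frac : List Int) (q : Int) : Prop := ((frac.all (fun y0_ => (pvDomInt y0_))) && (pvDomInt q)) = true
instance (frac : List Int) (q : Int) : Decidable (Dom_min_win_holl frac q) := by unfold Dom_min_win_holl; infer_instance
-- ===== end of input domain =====

-- B builds the size-bucketed subset table by a Pascal-triangle recursion and filters it once with an
-- all()-based minimality test, instead of A's per-size itertools.combinations calls and three staged
-- build-and-rescan lists (objective: alternative decomposition; same output, same order).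

-- ===== PORT A =====
-- itertools.combinations(l, r) in Python's order
def pyCombinations {α : Type} (l : List α) (r : Nat) : List (List α) :=
  match r, l with
  | 0, _ => [[]]
  | _+1, [] => []
  | r+1, x :: xs => (pyCombinations xs r).map (fun c => x :: c) ++ pyCombinations xs (r+1)

def combination_all (frac : List Int) : List (List (Int × Int)) :=
  let pairs := ((List.range (frac.length + 1)).map Int.ofNat).zip frac
  (List.range (frac.length + 1)).foldl (fun comb i => comb ++ pyCombinations pairs i) []

def all_win (frac : List Int) (q : Int) : List (List (Int × Int)) :=
  (combination_all frac).foldl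
    (fun acc c => if c.foldl (fun s p => s + p.2) 0 ≥ q then acc ++ [c] else acc) []

def min_win_holl (frac : List Int) (q : Int) : List (List (Int × Int)) :=
  (all_win frac q).foldl
    (fun acc c =>
      let s : Int := c.foldl (fun s p => s + p.2) 0
      let ind : Int := c.foldl (fun ind p => if s - p.2 ≥ q then (1 : Int) else ind) 0
      if ind = 0 then acc ++ [c] else acc) []

-- ===== PORT B =====
-- buckets(pairs)[r] = all size-r subsets of pairs, in lexicographic order (Pascal-triangle DP)
def pvBuckets (pairs : List (Int × Int)) : List (List (List (Int × Int))) :=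
  match pairs with
  | [] => [[[]]]
  | p :: ps =>
      let b := pvBuckets ps
      let shifted := b.map (List.map (fun c => p :: c))
      List.zipWith (fun x y => x ++ y) ([] :: shifted) (b ++ [[]])

def bKeep (q : Int) (c : List (Int × Int)) : Bool :=
  let s := c.foldl (fun s p => s + p.2) 0
  decide (s ≥ q) && c.all (fun p => decide (s - p.2 < q))

def min_win_holl_alt (frac : List Int) (q : Int) : List (List (Int × Int)) :=
  (pvBuckets (((List.range (frac.length + 1)).map Int.ofNat).zip frac)).foldl
    (fun out bucket => bucket.foldl
      (fun out c => if bKeep q c then out ++ [c] else out) out) []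

-- ===== PRECONDITION & SPEC =====
def Spec_min_win_holl (frac : List Int) (q : Int) (out : List (List (Int × Int))) : Prop := out = min_win_holl_alt frac q
instance (frac : List Int) (q : Int) (out : List (List (Int × Int))) : Decidable (Spec_min_win_holl frac q out) := by unfold Spec_min_win_holl; infer_instance

-- ===== CLAIM (what is proved, stated in full; the proofs are below) =====
def Claim_equal_min_win_holl : Prop := ∀ (frac : List Int) (q : Int), Dom_min_win_holl frac q → Spec_min_win_holl frac q (min_win_holl frac q)

-- ===== LEMMAS AND PROOFS =====

-- A's keep test: winning and the removal-loop indicator stays 0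
def aKeep (q : Int) (c : List (Int × Int)) : Bool :=
  let s := c.foldl (fun s p => s + p.2) 0
  decide (s ≥ q) && decide ((c.foldl (fun ind p => if s - p.2 ≥ q then (1 : Int) else ind) 0) = 0)

theorem ind_foldl (s q : Int) (c : List (Int × Int)) (i : Int) :
    c.foldl (fun ind p => if s - p.2 ≥ q then (1 : Int) else ind) i
      = if c.any (fun p => decide (s - p.2 ≥ q)) then 1 else i := by
  induction c generalizing i with
  | nil => simp
  | cons p t ih =>
      simp only [List.foldl_cons, List.any_cons]
      by_cases h : s - p.2 ≥ q
      · simp [h, ih]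
      · have hd : decide (s - p.2 ≥ q) = false := by simpa using h
        simp only [ih, hd, Bool.false_or, if_neg h]

theorem keep_eq (q : Int) (c : List (Int × Int)) : aKeep q c = bKeep q c := by
  unfold aKeep bKeep
  simp only [ind_foldl]
  set s := c.foldl (fun s p => s + p.2) 0
  by_cases h : c.any (fun p => decide (s - p.2 ≥ q))
  · have : c.all (fun p => decide (s - p.2 < q)) = false := by
      obtain ⟨x, hx, hx2⟩ := List.any_eq_true.mp h
      refine List.all_eq_false.mpr ⟨x, hx, ?_⟩
      simp only [decide_eq_true_eq] at hx2 ⊢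
      omega
    simp [h, this]
  · have : c.all (fun p => decide (s - p.2 < q)) = true := by
      refine List.all_eq_true.mpr ?_
      intro x hx
      have h' : c.any (fun p => decide (s - p.2 ≥ q)) = false := by simpa using h
      have := List.any_eq_false.mp h' x hx
      simp only [decide_eq_true_eq] at this ⊢
      omega
    simp [h, this]

theorem pyCombinations_eq_nil {α : Type} (l : List α) (r : Nat) (h : l.length < r) :
    pyCombinations l r = [] := by
  induction l generalizing r with
  | nil => cases r with | zero => omega | succ r => rfl
  | cons x xs ih =>
      cases r with
      | zero => omega
      | succ r =>
          simp only [List.length_cons] at h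
          simp only [pyCombinations]
          rw [ih r (by omega), ih (r + 1) (by omega)]
          rfl

theorem pvBuckets_length (pairs : List (Int × Int)) :
    (pvBuckets pairs).length = pairs.length + 1 := by
  induction pairs with
  | nil => rfl
  | cons p ps ih =>
      simp only [pvBuckets, List.length_zipWith, List.length_cons, List.length_map,
        List.length_append, ih, List.length_cons]
      omega

theorem pvBuckets_eq (pairs : List (Int × Int)) :
    pvBuckets pairs = (List.range (pairs.length + 1)).map (pyCombinations pairs) := by
  induction pairs with
  | nil => simp [pvBuckets, pyCombinations, List.range_succ]
  | cons p ps ih =>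
      apply List.ext_getElem
      · simp [pvBuckets_length]
      · intro r h1 h2
        have hr : r < ps.length + 2 := by
          rw [pvBuckets_length] at h1; simp at h1; omega
        simp only [List.getElem_map, List.getElem_range]
        simp only [pvBuckets, ih]
        rw [List.getElem_zipWith]
        cases r with
        | zero =>
            rw [List.getElem_cons_zero,
              List.getElem_append_left (by simp)]
            simp [pyCombinations]
        | succ k =>
            rw [List.getElem_cons_succ, List.getElem_map,
              List.getElem_map, List.getElem_range]
            by_cases hlt : k + 1 < ps.length + 1
            · rw [List.getElem_append_left (by simpa using hlt)]
              simp [pyCombinations]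
            · have hk1 : k = ps.length := by omega
              rw [List.getElem_append_right (by simp; omega)]
              subst hk1
              simp [pyCombinations, pyCombinations_eq_nil ps (ps.length + 1) (by omega)]

theorem flatMap_filter_comm {α : Type} (p : α → Bool) (f : Nat → List α) (l : List Nat) :
    (l.flatMap f).filter p = l.flatMap (fun r => (f r).filter p) := by
  induction l with
  | nil => rfl
  | cons x t ih => simp [List.flatMap_cons, List.filter_append, ih]

theorem alt_eq_filter (frac : List Int) (q : Int) :
    min_win_holl_alt frac q
      = ((List.range (frac.length + 1)).flatMap
          (pyCombinations (((List.range (frac.length + 1)).map Int.ofNat).zip frac))).filter (bKeep q) := by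
  unfold min_win_holl_alt
  set pairs := ((List.range (frac.length + 1)).map Int.ofNat).zip frac with hpairs
  have hlen : pairs.length = frac.length := by
    simp [hpairs, List.length_zip]
  rw [pvBuckets_eq, hlen]
  rw [PySem.List.foldl_congr_mem
      (g := fun out bucket => out ++ bucket.filter (bKeep q))
      (h := fun acc x _ => PySem.List.foldl_append_if_eq_filter (bKeep q) x acc)]
  rw [PySem.List.foldl_append_eq_flatMap]
  rw [List.flatMap_map, flatMap_filter_comm]
  rfl

theorem min_win_holl_eq_filter (frac : List Int) (q : Int) :
    min_win_holl frac q = (combination_all frac).filter (aKeep q) := by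
  unfold min_win_holl all_win
  rw [PySem.List.foldl_append_ite_eq_filter, PySem.List.foldl_append_ite_eq_filter]
  rw [List.nil_append, List.nil_append, List.filter_filter]
  refine List.filter_congr ?_
  intro c _
  unfold aKeep
  simp [Bool.and_comm]

theorem combination_all_eq (frac : List Int) :
    combination_all frac
      = (List.range (frac.length + 1)).flatMap
          (pyCombinations (((List.range (frac.length + 1)).map Int.ofNat).zip frac)) := by
  unfold combination_all
  rw [PySem.List.foldl_append_eq_flatMap]
  simp

-- ===== VERDICT (by name: the statement is the Claim_ definition above) =====
theorem min_win_holl_spec : Claim_equal_min_win_holl := by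
  intro frac q _
  unfold Spec_min_win_holl
  rw [alt_eq_filter, min_win_holl_eq_filter, combination_all_eq]
  exact List.filter_congr (fun c _ => keep_eq q c)
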